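-- pv_equiv track=rewrite | github.com/rpai0005/Propositional-Calculator | HonorsConversion.py | combinePremises
-- ===== SOURCE A (Python) =====
-- def combinePremises(d):
--     combList = []
--     simList = []
--     count = 0
--     for lis in d.values():
--         combList += lis
--         count += 1
--
--     combList.sort()
--
--     for ele in combList:
--         num = combList.count(ele)
--         if num == count and ele not in simList:
--             simList.append(ele)
--     return simList
-- ===== SOURCE B (Python) =====
-- def combinePremises(d):
--     count = len(d)
--     comb = sorted(x for lis in d.values() for x in lis)
--     res = []
--     i, n = 0, len(comb)
--     while i < n:
--         j = i + 1
--         while j < n and comb[j] == comb[i]: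
--             j += 1
--         if j - i == count:
--             res.append(comb[i])
--         i = j
--     return res
-- ===== Notes on version B (the rewrite author's own statement) =====
-- stated objective: faster
-- what changed: B replaces A's per-element combList.count(ele) scan plus 'not in simList' dedup with a single run-length pass over the sorted flattened list, keeping a run's head iff its length equals the number of keys.
import Mathlib
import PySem

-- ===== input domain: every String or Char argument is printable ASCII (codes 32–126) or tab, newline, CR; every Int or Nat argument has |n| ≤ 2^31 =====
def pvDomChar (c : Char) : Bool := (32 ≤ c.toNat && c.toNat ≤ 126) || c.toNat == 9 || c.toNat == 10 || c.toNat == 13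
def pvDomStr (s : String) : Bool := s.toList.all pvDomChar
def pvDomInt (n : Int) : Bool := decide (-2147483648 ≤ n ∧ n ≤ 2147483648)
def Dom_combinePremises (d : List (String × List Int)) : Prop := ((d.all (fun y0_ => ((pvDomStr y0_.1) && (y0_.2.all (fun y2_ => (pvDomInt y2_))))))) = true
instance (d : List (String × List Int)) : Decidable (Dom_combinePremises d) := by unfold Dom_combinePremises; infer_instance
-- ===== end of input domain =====

-- B replaces A's per-element combList.count scan (O(n^2)) by a single run-length pass over the sorted list (O(n log n)).

-- ===== PORT A =====
def combinePremises (d : List (String × List Int)) : List Int :=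
  -- for lis in d.values(): combList += lis; count += 1
  let st := d.foldl (fun (acc : List Int × Int) p => (acc.1 ++ p.2, acc.2 + 1)) ([], 0)
  -- combList.sort()
  let combList := PySem.List.sorted st.1 (fun x => x)
  -- for ele in combList: num = combList.count(ele); if num == count and ele not in simList: simList.append(ele)
  combList.foldl (fun simList ele =>
    if ((PySem.List.count combList ele : Int) == st.2) && !(simList.contains ele)
    then simList ++ [ele] else simList) []

-- ===== PORT B =====
-- the two nested while-loops of Source B: scan one run of equal elements, keep its head iff the run length is `count`
def scanRunsB (count : Nat) : List Int → List Int
  | [] => []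
  | x :: xs =>
    (if 1 + (xs.takeWhile (fun y => y == x)).length == count then [x] else []) ++
      scanRunsB count (xs.dropWhile (fun y => y == x))
termination_by l => l.length
decreasing_by
  simpa using Nat.lt_succ_of_le (List.length_dropWhile_le _ _)

def combinePremises_alt (d : List (String × List Int)) : List Int :=
  scanRunsB d.length (PySem.List.sorted (d.flatMap (fun p => p.2)) (fun x => x))

-- ===== PRECONDITION & SPEC =====
def Spec_combinePremises (d : List (String × List Int)) (out : List Int) : Prop := out = combinePremises_alt d
instance (d : List (String × List Int)) (out : List Int) : Decidable (Spec_combinePremises d out) := by unfold Spec_combinePremises; infer_instance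

-- ===== CLAIM (what is proved, stated in full; the proofs are below) =====
def Claim_equal_combinePremises : Prop := ∀ (d : List (String × List Int)), Dom_combinePremises d → Spec_combinePremises d (combinePremises d)

-- ===== LEMMAS AND PROOFS =====

-- A's accumulating loop over d.values() is (flatten, length)
lemma foldl_pair_eq (d : List (String × List Int)) (l : List Int) (n : Int) :
    d.foldl (fun (acc : List Int × Int) p => (acc.1 ++ p.2, acc.2 + 1)) (l, n)
      = (l ++ d.flatMap (fun p => p.2), n + d.length) := by
  induction d generalizing l n with
  | nil => simp
  | cons p d ih =>
    simp only [List.foldl_cons, ih, List.flatMap_cons, List.length_cons, Prod.mk.injEq]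
    refine ⟨by simp, by push_cast; ring⟩

lemma natCast_beq (a b : Nat) : (((a : Int) == (b : Int)) = (a == b)) := by
  by_cases h : a = b <;> simp [h]

-- in a sorted tail, x does not survive dropWhile (== x)
lemma not_mem_dropWhile_beq (x : Int) (xs : List Int)
    (hge : ∀ e ∈ xs, x ≤ e) (hp : xs.Pairwise (· ≤ ·)) :
    x ∉ xs.dropWhile (fun y => y == x) := by
  induction xs with
  | nil => simp
  | cons y ys ih =>
    by_cases h : y = x
    · subst h
      simp only [List.dropWhile_cons, beq_self_eq_true]
      exact ih (fun e he => hge e (List.mem_cons_of_mem _ he)) (List.Pairwise.sublist (List.sublist_cons_self _ _) hp)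
    · have hxy : x < y := lt_of_le_of_ne (hge y (List.mem_cons_self)) (fun h' => h h'.symm)
      rw [List.dropWhile_cons_of_neg (by simpa using h)]
      intro hmem
      rcases List.mem_cons.mp hmem with h1 | h2
      · exact absurd h1 (ne_of_lt hxy)
      · have := (List.pairwise_cons.mp hp).1 x h2
        exact absurd (lt_of_lt_of_le hxy this) (lt_irrefl x)

-- the takeWhile prefix is a replicate
lemma takeWhile_beq_replicate (x : Int) (xs : List Int) :
    xs.takeWhile (fun y => y == x) = List.replicate (xs.takeWhile (fun y => y == x)).length x := by
  rw [List.eq_replicate_iff]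
  exact ⟨rfl, fun b hb => by simpa using List.mem_takeWhile_imp hb⟩

-- count of the head in a sorted list = its run length
lemma count_head_sorted (x : Int) (xs : List Int)
    (hge : ∀ e ∈ xs, x ≤ e) (hp : xs.Pairwise (· ≤ ·)) :
    (x :: xs).count x = 1 + (xs.takeWhile (fun y => y == x)).length := by
  have hsplit : xs = xs.takeWhile (fun y => y == x) ++ xs.dropWhile (fun y => y == x) :=
    (List.takeWhile_append_dropWhile).symm
  have h0 : (xs.dropWhile (fun y => y == x)).count x = 0 :=
    List.count_eq_zero.mpr (not_mem_dropWhile_beq x xs hge hp)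
  have h1 : (xs.takeWhile (fun y => y == x)).count x = (xs.takeWhile (fun y => y == x)).length := by
    conv_lhs => rw [takeWhile_beq_replicate x xs]
    simp
  rw [List.count_cons_self]
  conv_lhs => rw [hsplit]
  rw [List.count_append, h0, h1]
  omega

-- A's dedup-append loop, with an accumulator prefix disjoint from the remaining input, factors out
lemma loop_prefix (g : Int → Bool) (t : List Int) :
    ∀ a b : List Int, (∀ e ∈ t, e ∉ a) →
    t.foldl (fun acc ele => if g ele && !(acc.contains ele) then acc ++ [ele] else acc) (a ++ b)
      = a ++ t.foldl (fun acc ele => if g ele && !(acc.contains ele) then acc ++ [ele] else acc) b := by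
  induction t with
  | nil => intro a b _; simp
  | cons e t ih =>
    intro a b hdisj
    have hea : e ∉ a := hdisj e List.mem_cons_self
    have hcont : (a ++ b).contains e = b.contains e := by
      simp [List.contains_eq_mem, hea]
    simp only [List.foldl_cons, hcont]
    by_cases hc : g e && !(b.contains e)
    · rw [if_pos hc, if_pos hc, List.append_assoc]
      exact ih a (b ++ [e]) (fun x hx => hdisj x (List.mem_cons_of_mem _ hx))
    · rw [if_neg hc, if_neg hc]
      exact ih a b (fun x hx => hdisj x (List.mem_cons_of_mem _ hx))

-- the loop ignores a replicated block once its head has been handled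
lemma loop_replicate_step (g : Int → Bool) (x : Int) (m : Nat) (a : List Int) (hfix : (if g x && !(a.contains x) then a ++ [x] else a) = a) :
    (List.replicate m x).foldl (fun acc ele => if g ele && !(acc.contains ele) then acc ++ [ele] else acc) a = a := by
  induction m with
  | zero => simp
  | succ m ih => rw [List.replicate_succ, List.foldl_cons, hfix]; exact ih

-- the main induction: on a sorted list the dedup-count loop equals the run scan
lemma loop_eq_scan : ∀ (n : Nat) (s : List Int), s.length ≤ n → s.Pairwise (· ≤ ·) → ∀ c : Nat,
    s.foldl (fun acc ele => if ((s.count ele : Int) == (c : Int)) && !(acc.contains ele) then acc ++ [ele] else acc) []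
      = scanRunsB c s := by
  intro n
  induction n with
  | zero =>
    intro s hs _ c
    have : s = [] := List.length_eq_zero_iff.mp (Nat.le_zero.mp hs)
    subst this; simp [scanRunsB]
  | succ n ih =>
    intro s hs hp c
    match s, hp with
    | [], _ => simp [scanRunsB]
    | x :: xs, hp =>
      have hge : ∀ e ∈ xs, x ≤ e := (List.pairwise_cons.mp hp).1
      have hpxs : xs.Pairwise (· ≤ ·) := (List.pairwise_cons.mp hp).2
      set w := xs.takeWhile (fun y => y == x) with hw
      set t := xs.dropWhile (fun y => y == x) with ht
      have hsplit : xs = w ++ t := (List.takeWhile_append_dropWhile).symm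
      have hxnott : x ∉ t := not_mem_dropWhile_beq x xs hge hpxs
      have hcnt : (x :: xs).count x = 1 + w.length := count_head_sorted x xs hge hpxs
      have hpt : t.Pairwise (· ≤ ·) := List.Pairwise.sublist (List.dropWhile_sublist _) hpxs
      have htlen : t.length ≤ n := by
        have h2 : t.length ≤ xs.length := List.length_dropWhile_le (fun y => y == x) xs
        simp only [List.length_cons] at hs
        omega
      -- count of any element of t in the full list equals its count in t
      have hcount_t : ∀ e ∈ t, (x :: xs).count e = t.count e := by
        intro e he
        have hex : e ≠ x := fun h => hxnott (h ▸ he)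
        have hew : e ∉ w := fun hmem => hex (by simpa using List.mem_takeWhile_imp hmem)
        have hw0 : w.count e = 0 := List.count_eq_zero.mpr hew
        rw [hsplit]
        simp [List.count_cons, List.count_append, hw0]
        exact fun h => hex h.symm
      set g : Int → Bool := fun ele => ((x :: xs).count ele : Int) == (c : Int) with hg
      have hwrep : w = List.replicate w.length x := by
        rw [hw]; exact takeWhile_beq_replicate x xs
      have hrepl : (x :: xs) = List.replicate (1 + w.length) x ++ t := by
        rw [Nat.add_comm, List.replicate_succ, List.cons_append, ← hwrep, ← hsplit]
      set a₀ : List Int := if g x then [x] else [] with ha₀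
      have hstep0 : (List.replicate (1 + w.length) x).foldl
          (fun acc ele => if g ele && !(acc.contains ele) then acc ++ [ele] else acc) [] = a₀ := by
        rw [Nat.add_comm, List.replicate_succ, List.foldl_cons]
        have h1 : (if g x && !(List.contains ([] : List Int) x) then ([] : List Int) ++ [x] else []) = a₀ := by
          simp [ha₀]
        rw [h1]
        apply loop_replicate_step
        by_cases hgx : g x = true
        · simp [ha₀, hgx]
        · simp [ha₀, hgx]
      have hdisj : ∀ e ∈ t, e ∉ a₀ := by
        intro e he hmem
        have : e = x := by
          by_cases hgx : g x = true <;> simp [ha₀, hgx] at hmem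
          exact hmem
        exact hxnott (this ▸ he)
      calc (x :: xs).foldl (fun acc ele => if g ele && !(acc.contains ele) then acc ++ [ele] else acc) []
          = t.foldl (fun acc ele => if g ele && !(acc.contains ele) then acc ++ [ele] else acc) a₀ := by
            rw [hrepl, List.foldl_append, hstep0]
        _ = a₀ ++ t.foldl (fun acc ele => if g ele && !(acc.contains ele) then acc ++ [ele] else acc) [] := by
            have := loop_prefix g t a₀ [] hdisj
            simpa using this
        _ = a₀ ++ t.foldl (fun acc ele => if ((t.count ele : Int) == (c : Int)) && !(acc.contains ele) then acc ++ [ele] else acc) [] := by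
            congr 1
            apply PySem.List.foldl_congr_mem
            intro acc e he
            simp only [hg]
            rw [hcount_t e he]
        _ = a₀ ++ scanRunsB c t := by rw [ih t htlen hpt c]
        _ = scanRunsB c (x :: xs) := by
            rw [scanRunsB]
            congr 1
            rw [ha₀]
            simp only [hg]
            rw [hcnt, ← hw]
            rw [natCast_beq]

-- ===== VERDICT (by name: the statement is the Claim_ definition above) =====
theorem combinePremises_spec : Claim_equal_combinePremises := by
  intro d _
  show combinePremises d = combinePremises_alt d
  unfold combinePremises combinePremises_alt
  simp only [foldl_pair_eq d [] 0, List.nil_append, Int.zero_add]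
  set s := PySem.List.sorted (d.flatMap (fun p => p.2)) (fun x => x) with hsdef
  have hp : s.Pairwise (· ≤ ·) := PySem.List.sorted_pairwise _ _
  have := loop_eq_scan s.length s le_rfl hp d.length
  simp only [PySem.List.count_eq]
  exact this
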